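-- pv_equiv track=rewrite | github.com/andrewcolinhunt/artisan-dev | src/artisan/execution/inputs/grouping.py | _match_cross_product
-- ===== SOURCE A (Python) =====
-- from itertools import product
--
-- def _match_cross_product(inputs: dict[str, list[str]]) -> list[dict[str, str]]:
--     """All combinations: N * M * ... groups."""
--     roles = list(inputs.keys())
--     if not roles:
--         return []
--
--     lists = [inputs[role] for role in roles]
--
--     matched_sets: list[dict[str, str]] = []
--     for combo in product(*lists):
--         matched_sets.append(dict(zip(roles, combo, strict=False)))
--
--     return matched_sets
-- ===== SOURCE B (Python) =====
-- def _match_cross_product(inputs: dict[str, list[str]]) -> list[dict[str, str]]: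
--     """All combinations, built by folding over roles (no itertools.product)."""
--     roles = list(inputs.keys())
--     if not roles:
--         return []
--     result = [{}]
--     for role in roles:
--         values = inputs[role]
--         result = [{**partial, role: value} for partial in result for value in values]
--     return result
-- ===== Notes on version B (the rewrite author's own statement) =====
-- stated objective: alternative
-- what changed: Replaced itertools.product over the value lists plus a dict(zip(roles, combo)) rebuild per combination with a single left fold over the roles that extends each partial dict by one (role, value) pair at a time.
import Mathlib
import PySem

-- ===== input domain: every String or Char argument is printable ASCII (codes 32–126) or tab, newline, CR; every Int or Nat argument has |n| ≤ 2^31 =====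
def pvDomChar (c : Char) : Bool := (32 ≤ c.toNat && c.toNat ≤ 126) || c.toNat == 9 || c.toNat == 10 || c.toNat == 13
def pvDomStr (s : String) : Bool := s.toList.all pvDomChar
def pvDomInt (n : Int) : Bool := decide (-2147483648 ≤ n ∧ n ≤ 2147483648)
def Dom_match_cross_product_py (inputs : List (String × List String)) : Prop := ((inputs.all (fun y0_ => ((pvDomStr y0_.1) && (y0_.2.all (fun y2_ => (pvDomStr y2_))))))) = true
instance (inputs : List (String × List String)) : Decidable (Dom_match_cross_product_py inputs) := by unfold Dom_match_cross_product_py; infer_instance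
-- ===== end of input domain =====

-- B replaces itertools.product + dict(zip(...)) per combination with a left fold over the
-- roles that extends each partial dict by one role at a time (objective: alternative decomposition).

-- ===== PORT A =====
-- itertools.product(*lists), last list varying fastest
def pyProduct (ls : List (List String)) : List (List String) :=
  match ls with
  | [] => [[]]
  | l :: rest => l.flatMap (fun x => (pyProduct rest).map (x :: ·))

def match_cross_product_py (inputs : List (String × List String)) : List (List (String × String)) :=
  let d := PySem.Dict.ofList inputs
  let roles := d.keys
  if roles = [] then []
  else
    let lists := roles.map (fun r => d.getD r [])
    -- for combo in product(*lists): matched_sets.append(dict(zip(roles, combo)))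
    (pyProduct lists).foldl
      (fun acc combo => acc ++ [(PySem.Dict.ofList (roles.zip combo)).items]) []

-- ===== PORT B =====
def match_cross_product_py_alt (inputs : List (String × List String)) : List (List (String × String)) :=
  let d := PySem.Dict.ofList inputs
  let roles := d.keys
  if roles = [] then []
  else
    -- result = [{}]; for role in roles: result = [{**partial, role: value} ...]
    -- roles are distinct dict keys, so {**partial, role: value} appends the new item.
    roles.foldl
      (fun result role =>
        result.flatMap (fun pt => (d.getD role []).map (fun v => pt ++ [(role, v)])))
      [[]]

-- ===== PRECONDITION & SPEC =====
def Spec_match_cross_product_py (inputs : List (String × List String)) (out : List (List (String × String))) : Prop := out = match_cross_product_py_alt inputs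
instance (inputs : List (String × List String)) (out : List (List (String × String))) : Decidable (Spec_match_cross_product_py inputs out) := by unfold Spec_match_cross_product_py; infer_instance

-- ===== CLAIM (what is proved, stated in full; the proofs are below) =====
def Claim_equal_match_cross_product_py : Prop := ∀ (inputs : List (String × List String)), Dom_match_cross_product_py inputs → Spec_match_cross_product_py inputs (match_cross_product_py inputs)

-- ===== LEMMAS AND PROOFS =====

-- the append-to-a-list loop is a map
theorem foldl_append_singleton {α β : Type} (f : α → β) (l : List α) (acc : List β) :
    l.foldl (fun acc c => acc ++ [f c]) acc = acc ++ l.map f := by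
  induction l generalizing acc with
  | nil => simp
  | cons x xs ih => simp [ih]

theorem length_mem_pyProduct (ls : List (List String)) (c : List String)
    (hc : c ∈ pyProduct ls) : c.length = ls.length := by
  induction ls generalizing c with
  | nil => simp [pyProduct] at hc; simp [hc]
  | cons l rest ih =>
    simp only [pyProduct, List.mem_flatMap, List.mem_map] at hc
    obtain ⟨x, _, c', hc', rfl⟩ := hc
    simp [ih c' hc']

theorem ofList_items_of_nodup (l : List (String × String))
    (h : (l.map Prod.fst).Nodup) : (PySem.Dict.ofList l).items = l := by
  have := PySem.Dict.items_foldl_insert_fresh l Prod.fst Prod.snd PySem.Dict.empty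
    (by intro a _; simp [PySem.Dict.contains_empty]) h
  simpa using this

-- B's fold computes the cross product with the last role varying fastest
theorem cross_fold (ps : List (String × List String)) (acc : List (List (String × String))) :
    ps.foldl
      (fun result p => result.flatMap (fun pt => p.2.map (fun v => pt ++ [(p.1, v)]))) acc
    = acc.flatMap (fun pt =>
        (pyProduct (ps.map Prod.snd)).map (fun c => pt ++ (ps.map Prod.fst).zip c)) := by
  induction ps generalizing acc with
  | nil => simp [pyProduct]
  | cons p ps ih =>
    simp only [List.foldl_cons, ih, List.map_cons, pyProduct]
    simp [List.flatMap_assoc, List.map_flatMap, List.flatMap_map, List.map_map,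
      Function.comp_def, List.append_assoc]

-- ===== VERDICT (by name: the statement is the Claim_ definition above) =====
theorem match_cross_product_py_spec : Claim_equal_match_cross_product_py := by
  intro inputs _
  unfold Spec_match_cross_product_py match_cross_product_py match_cross_product_py_alt
  set d := PySem.Dict.ofList inputs with hd
  have hnd : d.keys.Nodup := PySem.Dict.nodup_keys_ofList inputs
  by_cases h : d.keys = []
  · simp [h]
  · simp only [h]
    have hitems := PySem.Dict.items_eq_map_keys d hnd ([] : List String)
    -- rewrite B's fold over keys as a fold over items
    have hB :
        d.keys.foldl
          (fun result role =>
            result.flatMap (fun pt => (d.getD role []).map (fun v => pt ++ [(role, v)]))) [[]]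
        = d.items.foldl
          (fun result p => result.flatMap (fun pt => p.2.map (fun v => pt ++ [(p.1, v)]))) [[]] := by
      rw [hitems, List.foldl_map]
    rw [hB, cross_fold]
    have hfst : d.items.map Prod.fst = d.keys := by rw [hitems]; simp [List.map_map, Function.comp_def]
    have hsnd : d.items.map Prod.snd = d.keys.map (fun r => d.getD r []) := by
      rw [hitems]; simp [List.map_map, Function.comp_def]
    rw [foldl_append_singleton, hfst, hsnd]
    simp only [List.nil_append, List.flatMap_singleton]
    apply List.map_congr_left
    intro c hc
    apply ofList_items_of_nodup
    have hlen : c.length = d.keys.length := by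
      have := length_mem_pyProduct _ c hc; simpa using this
    rw [List.map_fst_zip (le_of_eq hlen.symm)]
    exact hnd
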